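-- pv_equiv track=rewrite | github.com/bluffish/ubev | datasets/carla.py | assign_weather_indices
-- ===== SOURCE A (Python) =====
-- def assign_weather_indices(total_length, weather_list, switch_frequency, repeat_times):
--     """
--     Assigns indices for each weather type with the first section of the first weather being (n-1) ticks long,
--     all others being n ticks long, and repeats the sequence `repeat_times` times.
--
--     Args:
--         total_length (int): Total length of the dataset (number of frames per cycle).
--         weather_list (list): List of weather types.
--         switch_frequency (int): Number of frames for each weather type (n ticks).
--         repeat_times (int): Number of times to repeat the sequence.
--
--     Returns:
--         dict: A dictionary with weather types as keys and lists of indices as values.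
--     """
--     # Initialize the dictionary to store indices for each weather type
--     weather_indices = {weather: [] for weather in weather_list}
--
--     # Calculate indices for a single cycle
--     single_cycle_indices = {weather: [] for weather in weather_list}
--     current_index = 0
--     first_weather_adjustment = switch_frequency - 1  # First section is (n-1) ticks
--     is_first_weather = True
--
--     while current_index < total_length:
--         for weather in weather_list:
--             # Determine the length of the current section
--             if is_first_weather:
--                 section_length = first_weather_adjustment
--                 is_first_weather = False
--             else:
--                 section_length = switch_frequency
--
--             # Add indices for the current weather
--             section_end = min(current_index + section_length, total_length)
--             single_cycle_indices[weather].extend(range(current_index, section_end))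
--
--             # Update the current index
--             current_index = section_end
--
--             # Break if we've reached the total length
--             if current_index >= total_length:
--                 break
--
--     # Repeat the indices for each cycle
--     total_length_per_cycle = sum(len(indices) for indices in single_cycle_indices.values())
--     for cycle in range(repeat_times):
--         for weather, indices in single_cycle_indices.items():
--             offset = cycle * total_length_per_cycle
--             weather_indices[weather].extend(idx + offset for idx in indices)
--
--     return weather_indices
-- ===== SOURCE B (Python) =====
-- def assign_weather_indices(total_length, weather_list, switch_frequency, repeat_times):
--     # Per-frame decomposition: build a single-cycle frame->weather label list, then
--     # fill the result with one linear scan per cycle.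
--     k = len(weather_list)
--     labels = []
--     for f in range(total_length):
--         if f < switch_frequency - 1:
--             sec = 0
--         else:
--             sec = (f - (switch_frequency - 1)) // switch_frequency + 1
--         labels.append(weather_list[sec % k])
--     weather_indices = {w: [] for w in weather_list}
--     for cycle in range(repeat_times):
--         base = cycle * total_length
--         for j, w in enumerate(labels):
--             weather_indices[w].append(base + j)
--     return weather_indices
-- ===== Notes on version B (the rewrite author's own statement) =====
-- stated objective: alternative
-- what changed: Replaces A's while/for per-section range building and items-based offset replication by a per-frame decomposition: a closed-form section formula labels every frame of one cycle, and the result is filled by a single linear scan per cycle appending cycle*total_length+j to the label's list.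
import Mathlib
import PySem

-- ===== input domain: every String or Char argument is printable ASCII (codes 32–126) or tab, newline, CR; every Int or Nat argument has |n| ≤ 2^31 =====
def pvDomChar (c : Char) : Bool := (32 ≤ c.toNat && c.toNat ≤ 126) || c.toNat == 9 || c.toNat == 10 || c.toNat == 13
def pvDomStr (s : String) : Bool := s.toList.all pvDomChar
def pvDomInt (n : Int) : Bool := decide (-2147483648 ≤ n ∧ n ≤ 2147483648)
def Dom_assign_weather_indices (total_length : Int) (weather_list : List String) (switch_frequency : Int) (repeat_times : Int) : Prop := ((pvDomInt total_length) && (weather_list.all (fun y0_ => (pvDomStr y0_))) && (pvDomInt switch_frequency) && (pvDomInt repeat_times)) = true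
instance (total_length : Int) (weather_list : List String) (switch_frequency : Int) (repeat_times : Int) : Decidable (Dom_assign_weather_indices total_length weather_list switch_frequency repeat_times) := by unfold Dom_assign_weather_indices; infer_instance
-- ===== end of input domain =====

-- B replaces A's per-section range building + items-based replication by a per-frame
-- label map (closed-form section index) filled with one linear scan per cycle (objective: alternative).

-- ===== PORT A =====
-- inner `for weather in weather_list` loop; returns (dict, current_index, is_first_weather);
-- the `break` is the early return when current_index >= total_length.
-- `single_cycle_indices[weather].extend(...)` is Dict.modify (key always present: weather ∈ weather_list).
def pvInnerA (total_length : Int) (switch_frequency : Int) :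
    List String → PySem.Dict String (List Int) → Int → Bool →
    (PySem.Dict String (List Int)) × Int × Bool
  | [], d, c, fw => (d, c, fw)
  | w :: ws, d, c, fw =>
      let p := if fw then (switch_frequency - 1, false) else (switch_frequency, fw)
      let se := min (c + p.1) total_length
      let d' := d.modify w [] (· ++ PySem.List.pyRange c se 1)
      if total_length ≤ se then (d', se, p.2)
      else pvInnerA total_length switch_frequency ws d' se p.2

-- the `while current_index < total_length` loop, with fuel (termination guard only;
-- total_length.toNat + 2 outer iterations always suffice when the Python terminates).
def pvWhileA (total_length : Int) (weather_list : List String) (switch_frequency : Int) :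
    Nat → PySem.Dict String (List Int) → Int → Bool → PySem.Dict String (List Int)
  | 0, d, _, _ => d
  | fuel + 1, d, c, fw =>
      if c < total_length then
        let r := pvInnerA total_length switch_frequency weather_list d c fw
        pvWhileA total_length weather_list switch_frequency fuel r.1 r.2.1 r.2.2
      else d

def assign_weather_indices (total_length : Int) (weather_list : List String) (switch_frequency : Int) (repeat_times : Int) : List (String × List Int) :=
  let weather_indices := weather_list.foldl (fun d w => d.insert w ([] : List Int)) PySem.Dict.empty
  let single := pvWhileA total_length weather_list switch_frequency (total_length.toNat + 2)
      (weather_list.foldl (fun d w => d.insert w ([] : List Int)) PySem.Dict.empty) 0 true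
  let tlpc := (single.values.map PySem.List.len).sum
  ((PySem.List.pyRange 0 repeat_times 1).foldl (fun d cyc =>
      single.items.foldl (fun d p => d.modify p.1 [] (· ++ p.2.map (fun idx => idx + cyc * tlpc))) d)
    weather_indices).items

-- ===== PORT B =====
-- closed-form section index of frame f (section 0 is (n-1) ticks, later sections n ticks)
def pvSecB (switch_frequency : Int) (f : Int) : Int :=
  if f < switch_frequency - 1 then 0
  else PySem.Int.floordiv (f - (switch_frequency - 1)) switch_frequency + 1

def assign_weather_indices_alt (total_length : Int) (weather_list : List String) (switch_frequency : Int) (repeat_times : Int) : List (String × List Int) :=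
  let k := PySem.List.len weather_list
  let labels := (PySem.List.pyRange 0 total_length 1).map (fun f =>
      PySem.List.pyGetD weather_list (PySem.Int.mod (pvSecB switch_frequency f) k) "")
  let d0 := weather_list.foldl (fun d w => d.insert w ([] : List Int)) PySem.Dict.empty
  ((PySem.List.pyRange 0 repeat_times 1).foldl (fun d cyc =>
      (PySem.List.enumerate labels 0).foldl
        (fun d p => d.modify p.2 [] (· ++ [cyc * total_length + p.1])) d) d0).items

-- ===== PRECONDITION & SPEC =====
-- Pre_ excludes exactly the inputs where Python A never returns: with total_length > 0 and an
-- empty weather_list or switch_frequency < 1 the while loop makes no progress and A diverges.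
def Pre_assign_weather_indices (total_length : Int) (weather_list : List String) (switch_frequency : Int) (repeat_times : Int) : Prop :=
  total_length ≤ 0 ∨ (weather_list ≠ [] ∧ 1 ≤ switch_frequency)
instance (total_length : Int) (weather_list : List String) (switch_frequency : Int) (repeat_times : Int) : Decidable (Pre_assign_weather_indices total_length weather_list switch_frequency repeat_times) := by unfold Pre_assign_weather_indices; infer_instance

def pvWitness_assign_weather_indices : Int × List String × Int × Int := (5, ["rain", "sun"], 2, 2)

def Spec_assign_weather_indices (total_length : Int) (weather_list : List String) (switch_frequency : Int) (repeat_times : Int) (out : List (String × List Int)) : Prop := out = assign_weather_indices_alt total_length weather_list switch_frequency repeat_times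
instance (total_length : Int) (weather_list : List String) (switch_frequency : Int) (repeat_times : Int) (out : List (String × List Int)) : Decidable (Spec_assign_weather_indices total_length weather_list switch_frequency repeat_times out) := by unfold Spec_assign_weather_indices; infer_instance

-- ===== CLAIM (what is proved, stated in full; the proofs are below) =====
def Claim_equal_assign_weather_indices : Prop := ∀ (total_length : Int) (weather_list : List String) (switch_frequency : Int) (repeat_times : Int), Dom_assign_weather_indices total_length weather_list switch_frequency repeat_times → Pre_assign_weather_indices total_length weather_list switch_frequency repeat_times → Spec_assign_weather_indices total_length weather_list switch_frequency repeat_times (assign_weather_indices total_length weather_list switch_frequency repeat_times)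

-- ===== LEMMAS AND PROOFS =====

-- owner of frame f (what B computes per frame)
def pvOwner (weather_list : List String) (switch_frequency : Int) (f : Int) : String :=
  PySem.List.pyGetD weather_list (PySem.Int.mod (pvSecB switch_frequency f) (PySem.List.len weather_list)) ""

-- start frame of section s
def pvSt (n : Int) (s : Nat) : Int := if s = 0 then 0 else s * n - 1

theorem pvSt_succ (n : Int) (s : Nat) (hn : 1 ≤ n) :
    pvSt n (s + 1) = pvSt n s + (if s = 0 then n - 1 else n) := by
  unfold pvSt
  rcases Nat.eq_zero_or_pos s with h | h
  · subst h; simp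
  · have : s ≠ 0 := Nat.pos_iff_ne_zero.mp h
    simp [this]
    push_cast; ring

theorem pvSt_mono (n : Int) (hn : 1 ≤ n) {s t : Nat} (h : s ≤ t) : pvSt n s ≤ pvSt n t := by
  induction t with
  | zero => simp_all
  | succ t ih =>
      rcases Nat.lt_or_ge s (t+1) with h' | h'
      · have := ih (Nat.lt_succ_iff.mp h')
        rw [pvSt_succ n t hn]
        have : (0:Int) ≤ (if t = 0 then n - 1 else n) := by split <;> omega
        omega
      · have : s = t + 1 := le_antisymm h h'
        subst this; rfl

theorem pvSec_eq (n : Int) (hn : 1 ≤ n) (s : Nat) (f : Int)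
    (h1 : pvSt n s ≤ f) (h2 : f < pvSt n (s + 1)) : pvSecB n f = (s : Int) := by
  unfold pvSecB
  rcases Nat.eq_zero_or_pos s with hs | hs
  · subst hs
    have h2' : f < n - 1 := by simpa [pvSt] using h2
    simp [h2']
  · have hsne : s ≠ 0 := by omega
    have hs1 : (1:Int) ≤ (s:Int) := by exact_mod_cast hs
    have h1' : (s:Int) * n - 1 ≤ f := by simpa [pvSt, hsne] using h1
    have h2' : f < ((s:Int) + 1) * n - 1 := by
      have hne : s + 1 ≠ 0 := by omega
      have := h2
      simp only [pvSt, hne] at this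
      push_cast at this
      convert this using 2
    have hnf : ¬ f < n - 1 := by nlinarith
    have hd : PySem.Int.floordiv (f - (n - 1)) n = (s:Int) - 1 := by
      rw [PySem.Int.floordiv_eq_iff_of_pos (by omega)]
      constructor <;> nlinarith
    rw [if_neg hnf, hd]; ring

theorem pvFilter_of_not_mem {l : List (String × List Int)} {w : String}
    (hm : w ∉ l.map Prod.fst) : l.filter (fun p => p.1 == w) = [] := by
  induction l with
  | nil => rfl
  | cons p l ih =>
      simp only [List.map_cons, List.mem_cons, not_or] at hm
      rw [List.filter_cons, if_neg (by simpa using fun h => hm.1 h.symm)]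
      exact ih hm.2

theorem pvFilter_of_mem {l : List (String × List Int)} {w : String} {v : List Int}
    (hnd : (l.map Prod.fst).Nodup) (hm : (w, v) ∈ l) :
    l.filter (fun p => p.1 == w) = [(w, v)] := by
  induction l with
  | nil => cases hm
  | cons p l ih =>
      simp only [List.map_cons, List.nodup_cons] at hnd
      rcases List.mem_cons.mp hm with h | h
      · subst h
        rw [List.filter_cons, if_pos (by simp)]
        rw [pvFilter_of_not_mem hnd.1]
      · have hw : w ∈ l.map Prod.fst := by
          exact List.mem_map.mpr ⟨(w, v), h, rfl⟩
        have hne : p.1 ≠ w := fun he => hnd.1 (he ▸ hw)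
        rw [List.filter_cons, if_neg (by simpa using hne)]
        exact ih hnd.2 h

theorem pvGetD_foldl_modL (l : List (String × List Int)) (d : PySem.Dict String (List Int)) (w : String) :
    (l.foldl (fun d p => d.modify p.1 [] (· ++ p.2)) d).getD w []
      = d.getD w [] ++ ((l.filter (fun p => p.1 == w)).map Prod.snd).flatten := by
  induction l generalizing d with
  | nil => simp
  | cons p l ih =>
      simp only [List.foldl_cons]
      rw [ih, PySem.Dict.getD_modify]
      by_cases h : w = p.1
      · subst h; simp
      · have hb : (p.1 == w) = false := by simpa using Ne.symm h
        simp [hb, h]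

theorem pvKeys_foldl_modL (l : List (String × List Int)) (d : PySem.Dict String (List Int))
    (h : ∀ p ∈ l, p.1 ∈ d.keys) :
    (l.foldl (fun d p => d.modify p.1 [] (· ++ p.2)) d).keys = d.keys := by
  induction l generalizing d with
  | nil => rfl
  | cons p l ih =>
      simp only [List.foldl_cons]
      have hc : d.contains p.1 = true := (PySem.Dict.contains_iff_mem_keys d p.1).mpr (h p (by simp))
      have hk : (d.modify p.1 [] (· ++ p.2)).keys = d.keys := by
        rw [PySem.Dict.keys_modify, PySem.Dict.keys_insert_of_contains d _ hc]
      rw [ih, hk]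
      intro q hq
      rw [hk]; exact h q (by simp [hq])

theorem pvInit_getD (wl : List String) (d : PySem.Dict String (List Int))
    (h : ∀ w, d.getD w [] = []) (w : String) :
    (wl.foldl (fun d w => d.insert w ([] : List Int)) d).getD w [] = [] := by
  induction wl generalizing d with
  | nil => exact h w
  | cons x wl ih =>
      simp only [List.foldl_cons]
      exact ih _ (fun w' => by rw [PySem.Dict.getD_insert]; split <;> simp [h])

theorem pvInit_keys (wl : List String) :
    (wl.foldl (fun d w => d.insert w ([] : List Int)) PySem.Dict.empty).keys
      = PySem.Set.ofList wl := by
  have := PySem.Dict.keys_foldl_insert wl (fun _ _ => ([] : List Int)) PySem.Dict.empty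
  simpa [PySem.Dict.keys_empty, PySem.Set.ofList_eq_foldl, PySem.Set.update] using this

-- the inner for loop always clears is_first_weather once started with it false
theorem pvInnerA_fw (L n : Int) :
    ∀ (ws : List String) (d : PySem.Dict String (List Int)) (c : Int),
    (pvInnerA L n ws d c false).2.2 = false := by
  intro ws
  induction ws with
  | nil => intro d c; rfl
  | cons w ws ih =>
      intro d c
      simp only [pvInnerA, Bool.false_eq_true, if_false]
      split
      · rfl
      · exact ih _ _

-- characterization of the inner for loop
theorem pvInnerA_char (L : Int) (wl : List String) (n : Int) (hn : 1 ≤ n) :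
    ∀ (ws : List String) (j s : Nat) (d : PySem.Dict String (List Int)) (c : Int),
    ws = wl.drop j → (ws ≠ [] → j = s % wl.length) → c = pvSt n s → c < L →
    (∀ x ∈ wl, x ∈ d.keys) →
    (pvInnerA L n ws d c (decide (s = 0))).2.1 = min (pvSt n (s + ws.length)) L ∧
    (∀ w, (pvInnerA L n ws d c (decide (s = 0))).1.getD w []
        = d.getD w [] ++ (PySem.List.pyRange c (min (pvSt n (s + ws.length)) L)).filter
            (fun f => pvOwner wl n f == w)) ∧
    (pvInnerA L n ws d c (decide (s = 0))).1.keys = d.keys := by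
  intro ws
  induction ws with
  | nil =>
      intro j s d c _ _ hc hcL _
      refine ⟨?_, ?_, rfl⟩
      · simp only [pvInnerA, List.length_nil, Nat.add_zero]
        omega
      · intro w
        simp only [pvInnerA, List.length_nil, Nat.add_zero]
        rw [min_eq_left (by omega : pvSt n s ≤ L), ← hc,
          PySem.List.pyRange_one_eq_nil (by omega)]
        simp
  | cons w0 ws ih =>
      intro j s d c hdrop hjs hc hcL hsub
      have hj : j < wl.length := by
        by_contra hj
        rw [List.drop_eq_nil_of_le (by omega)] at hdrop
        exact List.cons_ne_nil _ _ hdrop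
      have hw0 : wl[j] = w0 := by
        have h0 : (wl.drop j)[0]? = some w0 := by rw [← hdrop]; rfl
        rw [List.getElem?_drop, Nat.add_zero, List.getElem?_eq_getElem hj] at h0
        exact (Option.some_inj.mp h0)
      have hjs' : j = s % wl.length := hjs (List.cons_ne_nil _ _)
      have hkpos : 0 < wl.length := by omega
      have hsl : pvSt n (s + 1) = c + (if s = 0 then n - 1 else n) := by
        rw [pvSt_succ n s hn, hc]
      have h0le : (0:Int) ≤ (if s = 0 then n - 1 else n) := by split <;> omega
      -- owner of every frame of section s is w0
      have howner : ∀ f : Int, c ≤ f → f < min (pvSt n (s + 1)) L → pvOwner wl n f = w0 := by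
        intro f h1 h2
        have hminle := min_le_left (pvSt n (s+1)) L
        have hsec : pvSecB n f = (s : Int) :=
          pvSec_eq n hn s f (by omega) (by omega)
        unfold pvOwner
        rw [hsec]
        have hmod : PySem.Int.mod (s : Int) (PySem.List.len wl) = ((s % wl.length : Nat) : Int) := by
          rw [PySem.List.len_eq, PySem.Int.mod_eq_emod_of_pos (by exact_mod_cast hkpos)]
          exact (Int.natCast_mod s wl.length).symm
        rw [hmod, ← hjs', PySem.List.pyGetD_natCast, List.getD_eq_getElem?_getD,
          List.getElem?_eq_getElem hj, hw0]
        rfl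
      have hfilter : ∀ (a b : Int), c ≤ a → b ≤ min (pvSt n (s+1)) L → ∀ w,
          (PySem.List.pyRange a b).filter (fun f => pvOwner wl n f == w)
            = if w0 == w then PySem.List.pyRange a b else [] := by
        intro a b ha hb w
        by_cases hw : w0 = w
        · rw [if_pos (by simp [hw])]
          apply List.filter_eq_self.mpr
          intro f hf
          rw [PySem.List.mem_pyRange_one] at hf
          rw [howner f (by omega) (by omega), hw]
          simp
        · rw [if_neg (by simpa using hw)]
          apply List.filter_eq_nil_iff.mpr
          intro f hf
          rw [PySem.List.mem_pyRange_one] at hf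
          rw [howner f (by omega) (by omega)]
          simpa using hw
      have hw0mem : w0 ∈ wl := hw0 ▸ List.getElem_mem hj
      have hcont : d.contains w0 = true :=
        (PySem.Dict.contains_iff_mem_keys d w0).mpr (hsub w0 hw0mem)
      have hred : pvInnerA L n (w0 :: ws) d c (decide (s = 0))
          = (if L ≤ min (c + (if s = 0 then n - 1 else n)) L
             then (d.modify w0 [] (· ++ PySem.List.pyRange c (min (c + (if s = 0 then n - 1 else n)) L)),
                   min (c + (if s = 0 then n - 1 else n)) L, false)
             else pvInnerA L n ws
                   (d.modify w0 [] (· ++ PySem.List.pyRange c (min (c + (if s = 0 then n - 1 else n)) L)))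
                   (min (c + (if s = 0 then n - 1 else n)) L) false) := by
        by_cases hs0 : s = 0
        · subst hs0; rfl
        · have hd0 : (decide (s = 0) : Bool) = false := by simp [hs0]
          rw [hd0, if_neg hs0]
          rfl
      rw [hred]
      set se := min (c + (if s = 0 then n - 1 else n)) L with hse
      have hsee : se = min (pvSt n (s + 1)) L := by rw [hse, hsl]
      set d' := d.modify w0 [] (· ++ PySem.List.pyRange c se) with hd'
      have hcse : c ≤ se := by rw [hse]; omega
      have hd'getD : ∀ w, d'.getD w []
          = d.getD w [] ++ (PySem.List.pyRange c se).filter (fun f => pvOwner wl n f == w) := by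
        intro w
        rw [hd', PySem.Dict.getD_modify, hfilter c se (le_refl c) (le_of_eq hsee) w]
        by_cases hw : w = w0
        · subst hw; simp
        · rw [if_neg hw, if_neg (by simpa using fun h => hw h.symm)]
          simp
      have hd'keys : d'.keys = d.keys := by
        rw [hd', PySem.Dict.keys_modify, PySem.Dict.keys_insert_of_contains d _ hcont]
      have hmono1 : pvSt n (s + 1) ≤ pvSt n (s + (w0 :: ws).length) :=
        pvSt_mono n hn (by simp)
      by_cases hbrk : L ≤ se
      · rw [if_pos hbrk]
        have hseL : se = L := by omega
        have hmin : min (pvSt n (s + (w0 :: ws).length)) L = L := by omega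
        refine ⟨by show se = _; omega, ?_, hd'keys⟩
        intro w
        show d'.getD w [] = _
        rw [hmin, ← hseL]
        exact hd'getD w
      · rw [if_neg hbrk]
        have hseL : se < L := by omega
        have hse' : se = pvSt n (s + 1) := by omega
        have hdrop' : ws = wl.drop (j + 1) := by
          have : wl.drop (j + 1) = (wl.drop j).drop 1 := by
            rw [List.drop_drop]
          rw [this, ← hdrop]
          rfl
        have hjs2 : ws ≠ [] → j + 1 = (s + 1) % wl.length := by
          intro hne
          have hj1 : j + 1 < wl.length := by
            by_contra hge
            rw [hdrop', List.drop_eq_nil_of_le (by omega)] at hne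
            exact hne rfl
          have hmod1 : (1 : Nat) % wl.length = 1 := Nat.mod_eq_of_lt (by omega)
          have heq : (s + 1) % wl.length = (j + 1) % wl.length := by
            conv_lhs => rw [Nat.add_mod, ← hjs', hmod1]
          rw [heq, Nat.mod_eq_of_lt hj1]
        have ihres := ih (j + 1) (s + 1) d' se hdrop' hjs2 hse' hseL
          (fun x hx => hd'keys ▸ hsub x hx)
        have hfw : (decide (s + 1 = 0) : Bool) = false := by simp
        rw [hfw] at ihres
        obtain ⟨ih1, ih2, ih3⟩ := ihres
        have harr : s + 1 + ws.length = s + (w0 :: ws).length := by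
          simp [List.length_cons]; omega
        rw [harr] at ih1 ih2
        refine ⟨ih1, ?_, by rw [ih3, hd'keys]⟩
        intro w
        rw [ih2 w, hd'getD w]
        have hse2 : se ≤ min (pvSt n (s + (w0 :: ws).length)) L := by omega
        rw [PySem.List.pyRange_one_append c se (min (pvSt n (s + (w0 :: ws).length)) L) hcse hse2,
          List.filter_append, List.append_assoc]
theorem pvInnerA_fw_cons (L n : Int) (w0 : String) (ws : List String)
    (d : PySem.Dict String (List Int)) (c : Int) (fw : Bool) :
    (pvInnerA L n (w0 :: ws) d c fw).2.2 = false := by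
  cases fw
  · exact pvInnerA_fw L n (w0 :: ws) d c
  · simp only [pvInnerA, reduceIte]
    split
    · rfl
    · exact pvInnerA_fw L n ws _ _

-- characterization of the while loop
theorem pvWhileA_char (L : Int) (wl : List String) (n : Int) (hn : 1 ≤ n) (hk : wl ≠ []) :
    ∀ (fuel : Nat) (s : Nat) (d : PySem.Dict String (List Int)) (c : Int),
    c = pvSt n s → s % wl.length = 0 → c < L →
    (L - c).toNat + (if s = 0 then 2 else 1) ≤ fuel →
    (∀ x ∈ wl, x ∈ d.keys) →
    (∀ w, (pvWhileA L wl n fuel d c (decide (s = 0))).getD w []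
        = d.getD w [] ++ (PySem.List.pyRange c L).filter (fun f => pvOwner wl n f == w)) ∧
    (pvWhileA L wl n fuel d c (decide (s = 0))).keys = d.keys := by
  intro fuel
  induction fuel with
  | zero =>
      intro s d c _ _ hcL hfuel _
      exfalso
      have : (0:Int) < L - c := by omega
      have h1 : 1 ≤ (L - c).toNat := by omega
      have : (1:Nat) ≤ (if s = 0 then 2 else 1) := by split <;> omega
      omega
  | succ fuel ih =>
      intro s d c hc hs0k hcL hfuel hsub
      obtain ⟨w0, ws', hwl⟩ := List.exists_cons_of_ne_nil hk
      have hkpos : 0 < wl.length := by rw [hwl]; simp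
      obtain ⟨i1, i2, i3⟩ := pvInnerA_char L wl n hn wl 0 s d c rfl
        (fun _ => hs0k.symm) hc hcL hsub
      have ifw : (pvInnerA L n wl d c (decide (s = 0))).2.2 = false := by
        rw [hwl]; exact pvInnerA_fw_cons L n w0 ws' d c _
      have hmono1 : pvSt n (s + 1) ≤ pvSt n (s + wl.length) := pvSt_mono n hn (by omega)
      have hsucc : pvSt n (s + 1) = c + (if s = 0 then n - 1 else n) := by
        rw [pvSt_succ n s hn, hc]
      simp only [pvWhileA, if_pos hcL]
      rw [i1, ifw]
      set c' := min (pvSt n (s + wl.length)) L with hc'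
      by_cases hrec : c' < L
      · have hc'eq : c' = pvSt n (s + wl.length) := by omega
        have hs' : (s + wl.length) % wl.length = 0 := by
          rw [Nat.add_mod_right, hs0k]
        have hs'ne : s + wl.length ≠ 0 := by omega
        have hfuel' : (L - c').toNat + (if s + wl.length = 0 then 2 else 1) ≤ fuel := by
          rw [if_neg hs'ne]
          by_cases hs0 : s = 0
          · subst hs0
            simp only [reduceIte] at hfuel hsucc
            omega
          · simp only [if_neg hs0] at hfuel hsucc
            omega
        have hdf : (decide (s + wl.length = 0) : Bool) = false := decide_eq_false hs'ne
        obtain ⟨w1, w2⟩ := ih (s + wl.length) (pvInnerA L n wl d c (decide (s = 0))).1 c'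
          hc'eq hs' hrec hfuel' (fun x hx => i3 ▸ hsub x hx)
        rw [hdf] at w1 w2
        refine ⟨?_, by rw [w2, i3]⟩
        intro w
        rw [w1 w, i2 w]
        have hcc' : c ≤ c' := by
          have : c ≤ pvSt n (s + 1) := by rw [hsucc]; split <;> omega
          omega
        rw [PySem.List.pyRange_one_append c c' L hcc' (by omega),
          List.filter_append, List.append_assoc]
      · have hc'L : c' = L := by omega
        obtain ⟨f2, rfl⟩ : ∃ k, fuel = k + 1 := ⟨fuel - 1, by
          have : 1 ≤ (L - c).toNat := by omega
          have : (1:Nat) ≤ (if s = 0 then 2 else 1) := by split <;> omega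
          omega⟩
        rw [hc'L]
        simp only [pvWhileA, lt_irrefl, if_false]
        constructor
        · intro w
          rw [i2 w, hc'L]
        · exact i3

-- counting: every frame lands in exactly one key
theorem pvIndicator_sum (g : Int → String) (f : Int) :
    ∀ (ks : List String), ks.Nodup → g f ∈ ks →
    (ks.map (fun w => if g f == w then (1:Int) else 0)).sum = 1 := by
  intro ks
  induction ks with
  | nil => intro _ h; cases h
  | cons x ks ih =>
      intro hnd hm
      obtain ⟨hx, hnd'⟩ := List.nodup_cons.mp hnd
      simp only [List.map_cons, List.sum_cons]
      rcases List.mem_cons.mp hm with h | h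
      · rw [if_pos (by simp [h])]
        have hz : (ks.map (fun w => if g f == w then (1:Int) else 0)).sum = 0 := by
          apply List.sum_eq_zero
          intro y hy
          obtain ⟨w, hw, rfl⟩ := List.mem_map.mp hy
          rw [if_neg (by simp; intro he; exact hx (h ▸ he ▸ hw))]
        rw [hz]
        ring
      · have hne : (g f == x) = false := by
          simp only [beq_eq_false_iff_ne, ne_eq]
          intro he
          exact hx (he ▸ h)
        rw [hne, if_neg (by simp), ih hnd' h]
        ring

theorem pvCount_sum (g : Int → String) :
    ∀ (fr : List Int) (ks : List String), ks.Nodup → (∀ f ∈ fr, g f ∈ ks) →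
    (ks.map (fun w => ((fr.filter (fun f => g f == w)).length : Int))).sum = (fr.length : Int) := by
  intro fr
  induction fr with
  | nil =>
      intro ks _ _
      have := PySem.List.sum_map_const_int ks 0
      simpa using this
  | cons f fr ihf =>
      intro ks hnd hsubk
      have hstep : (ks.map (fun w => (((f :: fr).filter (fun x => g x == w)).length : Int)))
          = ks.map (fun w => (if g f == w then (1:Int) else 0)
              + ((fr.filter (fun x => g x == w)).length : Int)) := by
        apply List.map_congr_left
        intro w _
        rw [List.filter_cons]
        by_cases hw : (g f == w) = true
        · rw [if_pos hw, if_pos hw]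
          simp only [List.length_cons]
          push_cast; ring
        · rw [if_neg hw, if_neg hw]
          simp
      rw [hstep, PySem.List.sum_map_add_int,
        pvIndicator_sum g f ks hnd (hsubk f (by simp)),
        ihf ks hnd (fun x hx => hsubk x (by simp [hx]))]
      simp only [List.length_cons]
      push_cast; ring

theorem pvOwner_mem (wl : List String) (n : Int) (f : Int) (hk : wl ≠ []) :
    pvOwner wl n f ∈ wl := by
  have hkpos : 0 < wl.length := List.length_pos_iff.mpr hk
  have hkposI : (0:Int) < ((wl.length : Nat) : Int) := by exact_mod_cast hkpos
  unfold pvOwner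
  rw [PySem.List.len_eq]
  apply PySem.List.pyGetD_mem
  unfold PySem.Raise.InRange
  have h1 := PySem.Int.mod_nonneg (pvSecB n f) hkposI
  have h2 := PySem.Int.mod_lt (pvSecB n f) hkposI
  constructor <;> omega

theorem pvFlatten_map_singleton (l : List Int) (f : Int → Int) :
    (l.map (fun x => [f x])).flatten = l.map f := by
  induction l with
  | nil => rfl
  | cons x l ih => simp [ih]

-- a key's items entry is (key, getD key)
theorem pvGet_items (d : PySem.Dict String (List Int)) (w : String) (h : w ∈ d.keys) :
    (w, d.getD w []) ∈ d.items := by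
  have hc : d.contains w = true := (PySem.Dict.contains_iff_mem_keys d w).mpr h
  rw [PySem.Dict.contains_eq_isSome_get?] at hc
  obtain ⟨v, hv⟩ := Option.isSome_iff_exists.mp hc
  rw [PySem.Dict.getD_of_get?_eq_some _ _ hv]
  exact PySem.Dict.mem_items_of_get?_eq_some _ hv

-- A's replication loop over the cycles
theorem pvCyclesA (sd : PySem.Dict String (List Int)) (hnd : sd.keys.Nodup) (tlpc : Int) :
    ∀ (cycs : List Int) (d : PySem.Dict String (List Int)), d.keys = sd.keys →
    (∀ w, (cycs.foldl (fun d cyc =>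
          sd.items.foldl (fun d p => d.modify p.1 [] (· ++ p.2.map (fun idx => idx + cyc * tlpc))) d) d).getD w []
        = d.getD w [] ++ (cycs.map (fun cyc => (sd.getD w []).map (fun idx => idx + cyc * tlpc))).flatten) ∧
    (cycs.foldl (fun d cyc =>
          sd.items.foldl (fun d p => d.modify p.1 [] (· ++ p.2.map (fun idx => idx + cyc * tlpc))) d) d).keys = d.keys := by
  intro cycs
  induction cycs with
  | nil => intro d _; exact ⟨fun w => by simp, rfl⟩
  | cons cyc cycs ih =>
      intro d hkd
      simp only [List.foldl_cons]
      have hfold : ∀ (d0 : PySem.Dict String (List Int)),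
          sd.items.foldl (fun d p => d.modify p.1 [] (· ++ p.2.map (fun idx => idx + cyc * tlpc))) d0
            = (sd.items.map (fun p => (p.1, p.2.map (fun idx => idx + cyc * tlpc)))).foldl
                (fun d p => d.modify p.1 [] (· ++ p.2)) d0 := by
        intro d0
        rw [List.foldl_map]
      have hndi : (sd.items.map Prod.fst).Nodup := hnd
      have hd1getD : ∀ w,
          (sd.items.foldl (fun d p => d.modify p.1 [] (· ++ p.2.map (fun idx => idx + cyc * tlpc))) d).getD w []
            = d.getD w [] ++ (sd.getD w []).map (fun idx => idx + cyc * tlpc) := by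
        intro w
        rw [hfold d, pvGetD_foldl_modL]
        congr 1
        rw [List.filter_map]
        by_cases hw : w ∈ sd.keys
        · have hmem : (w, sd.getD w []) ∈ sd.items := pvGet_items sd w hw
          have : sd.items.filter ((fun p => p.1 == w) ∘ (fun p => (p.1, p.2.map (fun idx => idx + cyc * tlpc))))
              = sd.items.filter (fun p => p.1 == w) := by
            apply List.filter_congr
            intro p _
            rfl
          rw [this, pvFilter_of_mem hndi hmem]
          simp
        · have hw' : w ∉ sd.items.map Prod.fst := hw
          have : sd.items.filter ((fun p => p.1 == w) ∘ (fun p => (p.1, p.2.map (fun idx => idx + cyc * tlpc))))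
              = sd.items.filter (fun p => p.1 == w) := by
            apply List.filter_congr
            intro p _
            rfl
          rw [this, pvFilter_of_not_mem hw']
          have hcf : sd.contains w = false := by
            rw [PySem.Dict.contains_eq_decide_mem_keys]
            simpa using hw
          rw [PySem.Dict.getD_of_not_contains sd [] hcf]
          simp
      have hd1keys :
          (sd.items.foldl (fun d p => d.modify p.1 [] (· ++ p.2.map (fun idx => idx + cyc * tlpc))) d).keys = d.keys := by
        rw [hfold d]
        apply pvKeys_foldl_modL
        intro p hp
        obtain ⟨q, hq, rfl⟩ := List.mem_map.mp hp
        rw [hkd]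
        exact List.mem_map.mpr ⟨q, hq, rfl⟩
      obtain ⟨ihg, ihk⟩ := ih _ (by rw [hd1keys, hkd])
      refine ⟨?_, by rw [ihk, hd1keys]⟩
      intro w
      rw [ihg w, hd1getD w]
      simp [List.append_assoc]

-- B's replication loop over the cycles
theorem pvCyclesB (L : Int) (wl : List String) (n : Int) :
    ∀ (cycs : List Int) (d : PySem.Dict String (List Int)),
    (∀ f ∈ PySem.List.pyRange 0 L, pvOwner wl n f ∈ d.keys) →
    (∀ w, (cycs.foldl (fun d cyc =>
          (PySem.List.enumerate ((PySem.List.pyRange 0 L).map (fun f => pvOwner wl n f))).foldl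
            (fun d p => d.modify p.2 [] (· ++ [cyc * L + p.1])) d) d).getD w []
        = d.getD w [] ++ (cycs.map (fun cyc =>
            ((PySem.List.pyRange 0 L).filter (fun f => pvOwner wl n f == w)).map
              (fun f => cyc * L + f))).flatten) ∧
    (cycs.foldl (fun d cyc =>
          (PySem.List.enumerate ((PySem.List.pyRange 0 L).map (fun f => pvOwner wl n f))).foldl
            (fun d p => d.modify p.2 [] (· ++ [cyc * L + p.1])) d) d).keys = d.keys := by
  intro cycs
  induction cycs with
  | nil => intro d _; exact ⟨fun w => by simp, rfl⟩
  | cons cyc cycs ih =>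
      intro d hsub
      simp only [List.foldl_cons]
      -- rewrite the enumerate fold as a fold over the frames
      have hrange : PySem.List.pyRange 0 (PySem.List.len ((PySem.List.pyRange 0 L).map (fun f => pvOwner wl n f)))
          = PySem.List.pyRange 0 L := by
        rw [PySem.List.len_eq, List.length_map, PySem.List.length_pyRange_one]
        by_cases hL : L ≤ 0
        · rw [PySem.List.pyRange_one_eq_nil (by omega), PySem.List.pyRange_one_eq_nil hL]
        · congr 1
          omega
      have hfold : ∀ (d0 : PySem.Dict String (List Int)),
          (PySem.List.enumerate ((PySem.List.pyRange 0 L).map (fun f => pvOwner wl n f))).foldl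
              (fun d p => d.modify p.2 [] (· ++ [cyc * L + p.1])) d0
            = ((PySem.List.pyRange 0 L).map (fun f => (pvOwner wl n f, [cyc * L + f]))).foldl
                (fun d p => d.modify p.1 [] (· ++ p.2)) d0 := by
        intro d0
        rw [PySem.List.enumerate_eq_map_pyRange _ "", hrange, List.foldl_map, List.foldl_map]
        apply PySem.List.foldl_congr_mem
        intro acc j hj
        rw [PySem.List.mem_pyRange_one] at hj
        rw [PySem.List.pyGetD_map_pyRange_of_nonneg _ L j "" hj.1 hj.2]
      have hd1getD : ∀ w,
          ((PySem.List.enumerate ((PySem.List.pyRange 0 L).map (fun f => pvOwner wl n f))).foldl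
              (fun d p => d.modify p.2 [] (· ++ [cyc * L + p.1])) d).getD w []
            = d.getD w [] ++ ((PySem.List.pyRange 0 L).filter (fun f => pvOwner wl n f == w)).map
                (fun f => cyc * L + f) := by
        intro w
        rw [hfold d, pvGetD_foldl_modL]
        congr 1
        rw [List.filter_map]
        have hpred : ((PySem.List.pyRange 0 L).filter
              ((fun p => p.1 == w) ∘ (fun f => (pvOwner wl n f, [cyc * L + f]))))
            = (PySem.List.pyRange 0 L).filter (fun f => pvOwner wl n f == w) := by
          apply List.filter_congr
          intro f _
          rfl
        rw [hpred, List.map_map]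
        have : (Prod.snd ∘ fun f => (pvOwner wl n f, [cyc * L + f])) = fun f => [cyc * L + f] := rfl
        rw [this, pvFlatten_map_singleton]
      have hd1keys :
          ((PySem.List.enumerate ((PySem.List.pyRange 0 L).map (fun f => pvOwner wl n f))).foldl
              (fun d p => d.modify p.2 [] (· ++ [cyc * L + p.1])) d).keys = d.keys := by
        rw [hfold d]
        apply pvKeys_foldl_modL
        intro p hp
        obtain ⟨f, hf, rfl⟩ := List.mem_map.mp hp
        exact hsub f hf
      obtain ⟨ihg, ihk⟩ := ih _ (fun f hf => hd1keys ▸ hsub f hf)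
      refine ⟨?_, by rw [ihk, hd1keys]⟩
      intro w
      rw [ihg w, hd1getD w]
      simp [List.append_assoc]

-- ===== VERDICT (by name: the statement is the Claim_ definition above) =====
theorem assign_weather_indices_spec : Claim_equal_assign_weather_indices := by
  unfold Claim_equal_assign_weather_indices
  intro L wl n r _ hpre
  unfold Spec_assign_weather_indices
  simp only [assign_weather_indices, assign_weather_indices_alt]
  set init := wl.foldl (fun d w => d.insert w ([] : List Int)) PySem.Dict.empty with hinit
  have hinitkeys : init.keys = PySem.Set.ofList wl := pvInit_keys wl
  have hinitnodup : init.keys.Nodup := by rw [hinitkeys]; exact PySem.Set.nodup_ofList wl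
  have hinitgetD : ∀ w, init.getD w [] = [] :=
    fun w => pvInit_getD wl PySem.Dict.empty (fun w' => PySem.Dict.getD_empty w' []) w
  have hsubinit : ∀ x ∈ wl, x ∈ init.keys := fun x hx => by
    rw [hinitkeys]; exact (PySem.Set.mem_ofList wl x).mpr hx
  set single := pvWhileA L wl n (L.toNat + 2) init 0 true with hsingledef
  have hchar : (∀ w, single.getD w []
        = (PySem.List.pyRange 0 L).filter (fun f => pvOwner wl n f == w)) ∧
      single.keys = init.keys := by
    by_cases hL : L ≤ 0
    · have hstop : single = init := by
        rw [hsingledef]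
        show pvWhileA L wl n (L.toNat + 1 + 1) init 0 true = init
        simp only [pvWhileA]
        rw [if_neg (by omega : ¬ (0:Int) < L)]
      rw [hstop]
      exact ⟨fun w => by rw [hinitgetD w, PySem.List.pyRange_one_eq_nil hL]; rfl, rfl⟩
    · have hL' : (0:Int) < L := by omega
      obtain ⟨hk, hn⟩ : wl ≠ [] ∧ 1 ≤ n := by
        rcases hpre with h | h
        · exfalso; omega
        · exact h
      have hres := pvWhileA_char L wl n hn hk (L.toNat + 2) 0 init 0
        (by simp [pvSt]) (Nat.zero_mod _) hL' (by simp) hsubinit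
      have h00 : (decide ((0:Nat) = 0) : Bool) = true := rfl
      rw [h00] at hres
      obtain ⟨hg, hkk⟩ := hres
      exact ⟨fun w => by rw [hsingledef, hg w, hinitgetD w, List.nil_append], hkk⟩
  have hskeys : single.keys = PySem.Set.ofList wl := by rw [hchar.2, hinitkeys]
  have hsnodup : single.keys.Nodup := by rw [hskeys]; exact PySem.Set.nodup_ofList wl
  have howmem : ∀ f ∈ PySem.List.pyRange 0 L, pvOwner wl n f ∈ wl := by
    intro f hf
    rw [PySem.List.mem_pyRange_one] at hf
    have hk : wl ≠ [] := by
      rcases hpre with h | h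
      · exfalso; omega
      · exact h.1
    exact pvOwner_mem wl n f hk
  set tlpc := (single.values.map PySem.List.len).sum with htlpcdef
  have htlpc : tlpc = ((PySem.List.pyRange 0 L).length : Int) := by
    rw [htlpcdef, PySem.Dict.values_eq_map_keys single hsnodup [], List.map_map]
    have hcomp : (PySem.List.len ∘ fun k => single.getD k [])
        = fun k => (((PySem.List.pyRange 0 L).filter (fun f => pvOwner wl n f == k)).length : Int) := by
      funext k
      simp only [Function.comp_apply, hchar.1 k, PySem.List.len_eq]
    rw [hcomp, hskeys]
    exact pvCount_sum (pvOwner wl n) (PySem.List.pyRange 0 L) (PySem.Set.ofList wl)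
      (PySem.Set.nodup_ofList wl)
      (fun f hf => (PySem.Set.mem_ofList wl _).mpr (howmem f hf))
  obtain ⟨hAg, hAk⟩ := pvCyclesA single hsnodup tlpc (PySem.List.pyRange 0 r) init hchar.2.symm
  have hlam : (fun f => PySem.List.pyGetD wl (PySem.Int.mod (pvSecB n f) (PySem.List.len wl)) "")
      = (fun f => pvOwner wl n f) := rfl
  rw [hlam]
  obtain ⟨hBg, hBk⟩ := pvCyclesB L wl n (PySem.List.pyRange 0 r) init
    (fun f hf => by rw [hinitkeys]; exact (PySem.Set.mem_ofList wl _).mpr (howmem f hf))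
  have hAknodup : ((PySem.List.pyRange 0 r).foldl (fun d cyc =>
      single.items.foldl (fun d p => d.modify p.1 [] (· ++ p.2.map (fun idx => idx + cyc * tlpc))) d) init).keys.Nodup := by
    rw [hAk]; exact hinitnodup
  have hBknodup : ((PySem.List.pyRange 0 r).foldl (fun d cyc =>
      (PySem.List.enumerate ((PySem.List.pyRange 0 L).map (fun f => pvOwner wl n f))).foldl
        (fun d p => d.modify p.2 [] (· ++ [cyc * L + p.1])) d) init).keys.Nodup := by
    rw [hBk]; exact hinitnodup
  rw [PySem.Dict.items_eq_map_keys _ hAknodup [], PySem.Dict.items_eq_map_keys _ hBknodup [],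
    hAk, hBk]
  apply List.map_congr_left
  intro k _
  have hgoal : ((PySem.List.pyRange 0 r).foldl (fun d cyc =>
        single.items.foldl (fun d p => d.modify p.1 [] (· ++ p.2.map (fun idx => idx + cyc * tlpc))) d) init).getD k []
      = ((PySem.List.pyRange 0 r).foldl (fun d cyc =>
        (PySem.List.enumerate ((PySem.List.pyRange 0 L).map (fun f => pvOwner wl n f))).foldl
          (fun d p => d.modify p.2 [] (· ++ [cyc * L + p.1])) d) init).getD k [] := by
    rw [hAg k, hBg k]
    congr 1
    apply congrArg List.flatten
    apply List.map_congr_left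
    intro cyc _
    rw [hchar.1 k]
    by_cases hL : L ≤ 0
    · rw [PySem.List.pyRange_one_eq_nil hL]
      rfl
    · have htl : tlpc = L := by
        rw [htlpc, PySem.List.length_pyRange_one]
        omega
      rw [htl]
      apply List.map_congr_left
      intro f _
      ring
  rw [hgoal]
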